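-- pv_equiv track=rewrite | github.com/bansakdo/Algorithm | programmers/5. Brute-force/2. 소수 찾기.py | DFS
-- ===== SOURCE A (Python) =====
-- def isPrime(n):
--     if n <= 1:
--         return False
--     for i in range(2, n):
--         if n % i == 0:
--             return False
--     return True
--
-- def DFS(num_list, ch, number, primes):
--     if all(ch):
--         if number not in primes and isPrime(number):
--             primes.append(number)
--     else:
--         if number not in primes and isPrime(number):
--             primes.append(number)
--         for i, v in enumerate(ch):
--             if v == 0:
--                 ch[i] = 1
--                 use = num_list[i]
--                 primes = DFS(num_list, ch, int(str(number) + str(use)), primes)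
--                 ch[i] = 0
--     return primes
-- ===== SOURCE B (Python) =====
-- def DFS(num_list, ch, number, primes):
--     seen = set(primes)
--
--     def is_prime(n):  # trial division up to sqrt(n)
--         if n <= 1:
--             return False
--         d = 2
--         while d * d <= n:
--             if n % d == 0:
--                 return False
--             d += 1
--         return True
--
--     def walk(num, remaining):
--         if num not in seen and is_prime(num):
--             primes.append(num)
--             seen.add(num)
--         for k in range(len(remaining)):
--             i = remaining[k]
--             walk(int(str(num) + str(num_list[i])),
--                  remaining[:k] + remaining[k + 1:])
--
--     walk(number, [i for i, v in enumerate(ch) if v == 0])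
--     return primes
-- ===== Notes on version B (the rewrite author's own statement) =====
-- stated objective: alternative
-- what changed: B tests primality by trial division only up to sqrt(n) instead of A's scan of every i in [2,n), keeps a 'seen' set mirroring the primes list instead of rescanning the list for membership, and replaces A's mutate-and-restore flag array with a functional recursion over the list of still-unused indices (same visit order, same appends); a timing run did not certify a speed-up on the generated input family, so no speed is claimed.
import Mathlib
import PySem

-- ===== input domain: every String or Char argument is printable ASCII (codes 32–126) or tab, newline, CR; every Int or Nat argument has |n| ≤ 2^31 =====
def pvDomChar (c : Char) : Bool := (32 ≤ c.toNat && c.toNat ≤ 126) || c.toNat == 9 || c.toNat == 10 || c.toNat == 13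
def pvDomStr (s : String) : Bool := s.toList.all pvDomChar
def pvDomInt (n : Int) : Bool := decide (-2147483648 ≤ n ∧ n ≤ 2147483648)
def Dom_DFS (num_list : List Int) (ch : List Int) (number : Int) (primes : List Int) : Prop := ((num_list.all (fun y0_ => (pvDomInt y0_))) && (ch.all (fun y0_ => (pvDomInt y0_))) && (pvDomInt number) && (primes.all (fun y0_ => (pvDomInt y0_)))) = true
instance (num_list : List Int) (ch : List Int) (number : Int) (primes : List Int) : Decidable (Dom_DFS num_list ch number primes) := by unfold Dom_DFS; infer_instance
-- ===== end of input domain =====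

-- B (alternative implementation): trial division stops at sqrt(n) instead of scanning all
-- of [2,n), a 'seen' set mirrors the primes list instead of rescanning it for membership,
-- and the mutate/restore flag array becomes recursion over the unused-index list (same
-- visit order, so the same appends).  Python A appends to `primes` in place (B does the
-- same) and temporarily flips entries of `ch` but restores them; the equivalence proved
-- here is about the returned list.

-- int(str(number) + str(use)); the .getD 0 is unreachable under Pre_DFS (use ≥ 0 parses)
def pyCat (number use : Int) : Int :=
  (PySem.Int.ofStr? (PySem.Int.toStr number ++ PySem.Int.toStr use)).getD 0

-- ===== PORT A =====
-- `for i in range(2, n): if n % i == 0: return False` — early-exit loop, fuel = n-2 iterations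
def isPrimeA_loop : Nat → Int → Int → Bool
  | 0, _, _ => true
  | f + 1, n, i => if PySem.Int.mod n i == 0 then false else isPrimeA_loop f n (i + 1)

def isPrimeA (n : Int) : Bool := if n ≤ 1 then false else isPrimeA_loop (n - 2).toNat n 2

-- A's recursion; fuel = (number of zeros in ch) + 1 suffices, each recursive call removes a zero
def dfsA : Nat → List Int → List Int → Int → List Int → List Int
  | 0, _, _, _, primes => primes
  | fuel + 1, num_list, ch, number, primes =>
    if ch.all (fun v => v != 0) then
      (if !(primes.contains number) && isPrimeA number then primes ++ [number] else primes)
    else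
      let primes1 := if !(primes.contains number) && isPrimeA number then primes ++ [number] else primes
      (List.range ch.length).foldl
        (fun pr i =>
          if ch.getD i 1 == 0 then
            dfsA fuel num_list (ch.set i 1)
              (pyCat number ((PySem.List.pyGet? num_list (i : Int)).getD 0)) pr
          else pr) primes1

def DFS (num_list : List Int) (ch : List Int) (number : Int) (primes : List Int) : List Int :=
  dfsA (ch.count 0 + 1) num_list ch number primes

-- ===== PORT B =====
-- `while d * d <= n: …` — fuel n.toNat bounds the iteration count
def isPrimeB_loop : Nat → Int → Int → Bool
  | 0, _, _ => true
  | f + 1, n, d =>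
    if d * d ≤ n then (if PySem.Int.mod n d == 0 then false else isPrimeB_loop f n (d + 1))
    else true

def isPrimeB (n : Int) : Bool := if n ≤ 1 then false else isPrimeB_loop n.toNat n 2

-- walk(num, remaining); state is (primes, seen); fuel = remaining.length + 1 suffices,
-- each recursive call drops one index.  remaining[:k] + remaining[k+1:] = take k ++ drop (k+1).
def walkB : Nat → List Int → Int → List Nat → PySem.Set Int → List Int → List Int × PySem.Set Int
  | 0, _, _, _, seen, primes => (primes, seen)
  | fuel + 1, num_list, num, remaining, seen, primes =>
    let st := if !(PySem.Set.contains seen num) && isPrimeB num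
              then (primes ++ [num], PySem.Set.add seen num) else (primes, seen)
    (List.range remaining.length).foldl
      (fun acc k =>
        walkB fuel num_list
          (pyCat num ((PySem.List.pyGet? num_list ((remaining.getD k 0 : Nat) : Int)).getD 0))
          (remaining.take k ++ remaining.drop (k + 1)) acc.2 acc.1)
      st

def DFS_alt (num_list : List Int) (ch : List Int) (number : Int) (primes : List Int) : List Int :=
  let remaining := ((ch.zipIdx).filter (fun p => p.1 == 0)).map (fun p => p.2)
  (walkB (remaining.length + 1) num_list number remaining (PySem.Set.ofList primes) primes).1

-- ===== PRECONDITION & SPEC =====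
-- Pre_ excludes exactly the inputs where Python A raises: a zero flag whose index has no
-- num_list entry (IndexError) or a negative num_list entry that would be concatenated
-- (ValueError in int(str(number) + str(use))).  Python B raises on the same inputs.
def Pre_DFS (num_list : List Int) (ch : List Int) (number : Int) (primes : List Int) : Prop :=
  ∀ i : Nat, i < ch.length → ch.getD i 1 = 0 → i < num_list.length ∧ 0 ≤ num_list.getD i 0
instance (num_list : List Int) (ch : List Int) (number : Int) (primes : List Int) : Decidable (Pre_DFS num_list ch number primes) := by unfold Pre_DFS; infer_instance

def pvWitness_DFS : List Int × List Int × Int × List Int := ([1, 3], [0, 0], 0, [])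

def Spec_DFS (num_list : List Int) (ch : List Int) (number : Int) (primes : List Int) (out : List Int) : Prop := out = DFS_alt num_list ch number primes
instance (num_list : List Int) (ch : List Int) (number : Int) (primes : List Int) (out : List Int) : Decidable (Spec_DFS num_list ch number primes out) := by unfold Spec_DFS; infer_instance

-- ===== CLAIM (what is proved, stated in full; the proofs are below) =====
def Claim_equal_DFS : Prop := ∀ (num_list : List Int) (ch : List Int) (number : Int) (primes : List Int), Dom_DFS num_list ch number primes → Pre_DFS num_list ch number primes → Spec_DFS num_list ch number primes (DFS num_list ch number primes)

-- ===== LEMMAS AND PROOFS =====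

-- ---- primality: A's full scan agrees with B's sqrt-bounded scan ----

theorem loopA_iff (f : Nat) : ∀ (n i : Int),
    (isPrimeA_loop f n i = true ↔ ∀ d : Int, i ≤ d → d < i + (f : Int) → PySem.Int.mod n d ≠ 0) := by
  induction f with
  | zero =>
    intro n i
    simp only [isPrimeA_loop, Nat.cast_zero, add_zero]
    constructor
    · intro _ d h1 h2; omega
    · intro _; trivial
  | succ f ih =>
    intro n i
    simp only [isPrimeA_loop]
    by_cases h : PySem.Int.mod n i = 0
    · simp only [h, beq_self_eq_true, if_true]
      constructor
      · intro hfalse; exact absurd hfalse (by simp)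
      · intro hall
        exact absurd h (hall i le_rfl (by push_cast; omega))
    · have hbeq : (PySem.Int.mod n i == 0) = false := by simp [h]
      simp only [hbeq, Bool.false_eq_true, if_false, ih n (i + 1)]
      constructor
      · intro H d h1 h2
        rcases eq_or_lt_of_le h1 with rfl | hlt
        · exact h
        · exact H d (by omega) (by push_cast at h2 ⊢; omega)
      · intro H d h1 h2
        exact H d (by omega) (by push_cast at h2 ⊢; omega)

theorem loopB_iff (f : Nat) : ∀ (n i : Int), 0 < i → n + 1 ≤ i + (f : Int) →
    (isPrimeB_loop f n i = true ↔ ∀ d : Int, i ≤ d → d * d ≤ n → PySem.Int.mod n d ≠ 0) := by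
  induction f with
  | zero =>
    intro n i hi hbound
    simp only [isPrimeB_loop, Nat.cast_zero, add_zero] at *
    constructor
    · intro _ d h1 h2 _
      have hdd : d ≤ d * d := le_mul_of_one_le_left (by omega) (by omega)
      omega
    · intro _; trivial
  | succ f ih =>
    intro n i hi hbound
    simp only [isPrimeB_loop]
    by_cases hsq : i * i ≤ n
    · simp only [hsq, if_true]
      by_cases h : PySem.Int.mod n i = 0
      · simp only [h, beq_self_eq_true, if_true]
        constructor
        · intro hfalse; exact absurd hfalse (by simp)
        · intro hall; exact absurd h (hall i le_rfl hsq)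
      · have hbeq : (PySem.Int.mod n i == 0) = false := by simp [h]
        simp only [hbeq, Bool.false_eq_true, if_false,
          ih n (i + 1) (by omega) (by push_cast at hbound ⊢; omega)]
        constructor
        · intro H d h1 h2
          rcases eq_or_lt_of_le h1 with rfl | hlt
          · exact h
          · exact H d (by omega) h2
        · intro H d h1 h2
          exact H d (by omega) h2
    · simp only [hsq, if_false]
      constructor
      · intro _ d h1 h2 _
        have : i * i ≤ d * d := mul_le_mul h1 h1 (by omega) (by omega)
        omega
      · intro _; trivial

theorem isPrime_eq (n : Int) : isPrimeA n = isPrimeB n := by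
  by_cases hn : n ≤ 1
  · simp [isPrimeA, isPrimeB, hn]
  · have hn2 : 2 ≤ n := by omega
    simp only [isPrimeA, isPrimeB, if_neg hn]
    have hA := loopA_iff (n - 2).toNat n 2
    have hB := loopB_iff n.toNat n 2 (by omega) (by omega)
    have hcastA : ((n - 2).toNat : Int) = n - 2 := Int.toNat_of_nonneg (by omega)
    rw [hcastA] at hA
    rw [Bool.eq_iff_iff, hA, hB]
    constructor
    · intro H d h2 hdd
      have h2d : 2 * d ≤ d * d := mul_le_mul h2 le_rfl (by omega) (by omega)
      exact H d h2 (by omega)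
    · intro H d h2 hdn hmod
      obtain ⟨e, he⟩ := (PySem.Int.mod_eq_zero_iff_dvd n d).mp hmod
      have hd0 : 0 < d := by omega
      have he0 : 0 < e := by nlinarith
      have he1 : e ≠ 1 := by intro h1; rw [h1, mul_one] at he; omega
      by_cases hc : d * d ≤ n
      · exact H d h2 hc hmod
      · have hed : e < d := by nlinarith
        have hee : e * e ≤ n := by nlinarith
        have : PySem.Int.mod n e = 0 :=
          (PySem.Int.mod_eq_zero_iff_dvd n e).mpr ⟨d, by rw [he]; ring⟩
        exact H e (by omega) hee this

-- ---- the list of indices of the zero flags, in order ----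

def zeroIdxAux : List Int → Nat → List Nat
  | [], _ => []
  | a :: t, k => if a == 0 then k :: zeroIdxAux t (k + 1) else zeroIdxAux t (k + 1)

theorem zeroIdxAux_length : ∀ (ch : List Int) (k : Nat), (zeroIdxAux ch k).length = ch.count 0 := by
  intro ch
  induction ch with
  | nil => intro k; simp [zeroIdxAux]
  | cons a t ih =>
    intro k
    by_cases ha : a = 0 <;> simp [zeroIdxAux, ha, ih]

theorem filter_range'_eq_zeroIdxAux : ∀ (ch : List Int) (k : Nat),
    (List.range' k ch.length).filter (fun i => ch.getD (i - k) 1 == 0) = zeroIdxAux ch k := by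
  intro ch
  induction ch with
  | nil => intro k; simp [zeroIdxAux]
  | cons a t ih =>
    intro k
    have hcong : ∀ i ∈ List.range' (k + 1) t.length,
        ((a :: t).getD (i - k) 1 == 0) = (t.getD (i - (k + 1)) 1 == 0) := by
      intro i hi
      have hk : k + 1 ≤ i := (List.mem_range'_1.mp hi).1
      have : i - k = (i - (k + 1)) + 1 := by omega
      rw [this]
      rfl
    simp only [List.length_cons, List.range'_succ, List.filter_cons, Nat.sub_self,
      List.getD_cons_zero, List.filter_congr hcong, ih (k + 1), zeroIdxAux]

theorem filter_range_eq_zeroIdx (ch : List Int) :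
    (List.range ch.length).filter (fun i => ch.getD i 1 == 0) = zeroIdxAux ch 0 := by
  rw [List.range_eq_range']
  rw [← filter_range'_eq_zeroIdxAux ch 0]
  exact List.filter_congr (by intro i _; simp)

theorem zipIdx_filter_map : ∀ (ch : List Int) (k : Nat),
    ((ch.zipIdx k).filter (fun p => p.1 == 0)).map (fun p => p.2) = zeroIdxAux ch k := by
  intro ch
  induction ch with
  | nil => intro k; simp [zeroIdxAux]
  | cons a t ih =>
    intro k
    by_cases ha : a = 0 <;>
      simp [List.zipIdx_cons, ha, ih (k + 1), zeroIdxAux]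

theorem mem_zeroIdx {ch : List Int} {i : Nat} (h : i ∈ zeroIdxAux ch 0) :
    i < ch.length ∧ ch.getD i 1 = 0 := by
  rw [← filter_range_eq_zeroIdx] at h
  have := List.mem_filter.mp h
  refine ⟨List.mem_range.mp this.1, by simpa using this.2⟩

theorem zeroIdx_nil_iff (ch : List Int) :
    (zeroIdxAux ch 0 = []) ↔ (ch.all (fun v => v != 0) = true) := by
  have hlen := zeroIdxAux_length ch 0
  constructor
  · intro h
    rw [h] at hlen
    have h0 : (0 : Int) ∉ ch := List.count_eq_zero.mp hlen.symm
    simp only [List.all_eq_true]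
    intro v hv
    simp only [bne_iff_ne, ne_eq]
    intro hveq; exact h0 (hveq ▸ hv)
  · intro h
    have h0 : (0 : Int) ∉ ch := by
      intro hmem
      have := List.all_eq_true.mp h 0 hmem
      simp at this
    have : ch.count 0 = 0 := List.count_eq_zero.mpr h0
    rw [this] at hlen
    exact List.eq_nil_of_length_eq_zero hlen

theorem zeroIdxAux_le : ∀ (u : List Int) (m : Nat), ∀ x ∈ zeroIdxAux u m, m ≤ x := by
  intro u
  induction u with
  | nil => intro m x hx; simp [zeroIdxAux] at hx
  | cons b s ihs =>
    intro m x hx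
    by_cases hb : b = 0
    · simp only [zeroIdxAux, hb, beq_self_eq_true, if_true, List.mem_cons] at hx
      rcases hx with rfl | hx
      · omega
      · have := ihs (m + 1) x hx; omega
    · have hb' : ((b == (0 : Int))) = false := by simp [hb]
      simp only [zeroIdxAux, hb', Bool.false_eq_true, if_false] at hx
      have := ihs (m + 1) x hx; omega

theorem zeroIdxAux_set : ∀ (ch : List Int) (k : Nat) (d rest : List Nat) (i : Nat),
    zeroIdxAux ch k = d ++ i :: rest → zeroIdxAux (ch.set (i - k) 1) k = d ++ rest := by
  intro ch
  induction ch with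
  | nil => intro k d rest i h; simp [zeroIdxAux] at h
  | cons a t ih =>
    intro k d rest i h
    by_cases ha : a = 0
    · have ha' : ((a == (0 : Int))) = true := by simp [ha]
      simp only [zeroIdxAux, ha', if_true] at h
      cases d with
      | nil =>
        simp only [List.nil_append] at h
        injection h with h1 h2
        subst h1
        simp only [Nat.sub_self, List.set_cons_zero, List.nil_append]
        simp [zeroIdxAux, h2]
      | cons b d' =>
        injection h with h1 h2
        subst h1
        have hik : k + 1 ≤ i := zeroIdxAux_le t (k + 1) i (by rw [h2]; simp)
        have hstep : i - k = (i - (k + 1)) + 1 := by omega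
        rw [hstep, List.set_cons_succ]
        simp only [zeroIdxAux, ha', if_true, ih (k + 1) d' rest i h2, List.cons_append]
    · have ha' : ((a == (0 : Int))) = false := by simp [ha]
      simp only [zeroIdxAux, ha', Bool.false_eq_true, if_false] at h
      have hik : k + 1 ≤ i := zeroIdxAux_le t (k + 1) i (by rw [h]; simp)
      have hstep : i - k = (i - (k + 1)) + 1 := by omega
      rw [hstep, List.set_cons_succ]
      simp only [zeroIdxAux, ha', Bool.false_eq_true, if_false, ih (k + 1) d rest i h]

theorem count_set_zero : ∀ (ch : List Int) (i : Nat), i < ch.length → ch.getD i 1 = 0 →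
    (ch.set i 1).count 0 + 1 = ch.count 0 := by
  intro ch
  induction ch with
  | nil => intro i h; simp at h
  | cons a t ih =>
    intro i hlen hget
    cases i with
    | zero =>
      simp only [List.getD_cons_zero] at hget
      subst hget
      simp [List.count_cons]
    | succ j =>
      simp only [List.getD_cons_succ] at hget
      simp only [List.length_cons] at hlen
      have := ih j (by omega) hget
      simp only [List.set_cons_succ, List.count_cons]
      omega

-- ---- generic fold lemmas ----

theorem foldl_guard {α β : Type} (g : β → Bool) (F : α → β → α) :
    ∀ (l : List β) (p : α),
      l.foldl (fun pr i => if g i then F pr i else pr) p = (l.filter g).foldl F p := by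
  intro l
  induction l with
  | nil => intro p; simp
  | cons a t ih =>
    intro p
    by_cases h : g a <;> simp [List.filter_cons, h, ih]

theorem getD_append_cons {α : Type} (dflt : α) : ∀ (d : List α) (i : α) (r : List α),
    (d ++ i :: r).getD d.length dflt = i := by
  intro d
  induction d with
  | nil => intro i r; rfl
  | cons b d' ih => intro i r; simpa using ih i r

theorem drop_append_cons {α : Type} : ∀ (d : List α) (i : α) (r : List α),
    (d ++ i :: r).drop (d.length + 1) = r := by
  intro d i r
  have h : d ++ i :: r = (d ++ [i]) ++ r := by simp
  rw [h]
  have hl : d.length + 1 = (d ++ [i]).length := by simp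
  rw [hl, List.drop_left]

-- ---- the membership invariant between B's seen set and the primes list ----

def SeenInv (seen : PySem.Set Int) (primes : List Int) : Prop := ∀ x : Int, x ∈ seen ↔ x ∈ primes

theorem contains_eq_of_inv {seen : PySem.Set Int} {primes : List Int} (h : SeenInv seen primes)
    (num : Int) : PySem.Set.contains seen num = primes.contains num := by
  by_cases hm : num ∈ primes
  · simp [PySem.Set.contains_eq_listContains, hm, (h num).mpr hm]
  · have hs : num ∉ seen := fun hs => hm ((h num).mp hs)
    simp [PySem.Set.contains_eq_listContains, hm, hs]

theorem inv_add {seen : PySem.Set Int} {primes : List Int} (h : SeenInv seen primes) (x : Int) :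
    SeenInv (PySem.Set.add seen x) (primes ++ [x]) := by
  intro y
  rw [PySem.Set.mem_add]
  simp [h y]

-- ---- the main equivalence: A's recursion = B's walk over the zero-index list ----

theorem inner_eq (F fb' : Nat) (nl ch : List Int) (number : Int)
    (ih : ∀ (nl ch : List Int) (number : Int) (primes : List Int) (seen : PySem.Set Int),
      SeenInv seen primes → ch.count 0 < F → ∀ fb : Nat, ch.count 0 < fb →
      dfsA F nl ch number primes = (walkB fb nl number (zeroIdxAux ch 0) seen primes).1 ∧
      SeenInv (walkB fb nl number (zeroIdxAux ch 0) seen primes).2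
        (walkB fb nl number (zeroIdxAux ch 0) seen primes).1)
    (hF : ch.count 0 < F + 1) (hfb : ch.count 0 < fb' + 1) :
    ∀ (todo done : List Nat), zeroIdxAux ch 0 = done ++ todo →
    ∀ (pr : List Int) (sn : PySem.Set Int), SeenInv sn pr →
    ∀ p : List Int × PySem.Set Int,
      p = (List.range' done.length todo.length).foldl
        (fun acc k => walkB fb' nl
          (pyCat number ((PySem.List.pyGet? nl (((zeroIdxAux ch 0).getD k 0 : Nat) : Int)).getD 0))
          ((zeroIdxAux ch 0).take k ++ (zeroIdxAux ch 0).drop (k + 1)) acc.2 acc.1) (pr, sn) →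
      p.1 = todo.foldl (fun pr i => dfsA F nl (ch.set i 1)
          (pyCat number ((PySem.List.pyGet? nl (i : Int)).getD 0)) pr) pr ∧
      SeenInv p.2 p.1 := by
  intro todo
  induction todo with
  | nil =>
    intro done _ pr sn hinv p hp
    simp only [List.length_nil, List.range'_zero, List.foldl_nil] at hp
    subst hp
    exact ⟨rfl, hinv⟩
  | cons i rest ihT =>
    intro done hsplit pr sn hinv p hp
    have hgetD : (zeroIdxAux ch 0).getD done.length 0 = i := by
      rw [hsplit]; exact getD_append_cons 0 done i rest
    have htake : (zeroIdxAux ch 0).take done.length = done := by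
      rw [hsplit]; simp
    have hdrop : (zeroIdxAux ch 0).drop (done.length + 1) = rest := by
      rw [hsplit]; exact drop_append_cons done i rest
    have hmem : i ∈ zeroIdxAux ch 0 := by rw [hsplit]; simp
    obtain ⟨hilen, higet⟩ := mem_zeroIdx hmem
    have hcount := count_set_zero ch i hilen higet
    have hchild : zeroIdxAux (ch.set i 1) 0 = done ++ rest := by
      have h := zeroIdxAux_set ch 0 done rest i hsplit
      simpa using h
    have hih := ih nl (ch.set i 1)
      (pyCat number ((PySem.List.pyGet? nl (i : Int)).getD 0)) pr sn hinv
      (by omega) fb' (by omega)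
    rw [hchild] at hih
    simp only [List.length_cons, List.range'_succ, List.foldl_cons] at hp
    rw [hgetD, htake, hdrop] at hp
    have hnext := ihT (done ++ [i]) (by rw [hsplit]; simp) _ _ hih.2 p (by
      rw [List.length_append, List.length_cons, List.length_nil]
      rw [Prod.mk.eta]
      exact hp)
    refine ⟨?_, hnext.2⟩
    simp only [List.foldl_cons]
    rw [hih.1]
    exact hnext.1

theorem main_eq : ∀ (F : Nat) (nl ch : List Int) (number : Int) (primes : List Int)
    (seen : PySem.Set Int), SeenInv seen primes → ch.count 0 < F →
    ∀ fb : Nat, ch.count 0 < fb →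
    dfsA F nl ch number primes = (walkB fb nl number (zeroIdxAux ch 0) seen primes).1 ∧
    SeenInv (walkB fb nl number (zeroIdxAux ch 0) seen primes).2
        (walkB fb nl number (zeroIdxAux ch 0) seen primes).1 := by
  intro F
  induction F with
  | zero => intro nl ch number primes seen _ hF; omega
  | succ F ih =>
    intro nl ch number primes seen hInv hF fb hfb
    obtain ⟨fb', rfl⟩ : ∃ fb'', fb = fb'' + 1 := ⟨fb - 1, by omega⟩
    have hguard : (!(PySem.Set.contains seen number) && isPrimeB number)
        = (!(primes.contains number) && isPrimeA number) := by
      rw [contains_eq_of_inv hInv number, isPrime_eq]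
    simp only [dfsA, walkB]
    rw [hguard]
    set G := (!(primes.contains number) && isPrimeA number) with hG
    set st := if G = true then (primes ++ [number], PySem.Set.add seen number)
              else (primes, seen) with hst
    have hst1 : st.1 = (if G = true then primes ++ [number] else primes) := by
      by_cases hg : G = true <;> simp [hst, hg]
    have hInv1 : SeenInv st.2 st.1 := by
      by_cases hg : G = true
      · simp only [hst, hg, if_true]
        exact inv_add hInv number
      · simp only [hst, hg, if_false]
        exact hInv
    by_cases hall : ch.all (fun v => v != 0) = true
    · have hnil : zeroIdxAux ch 0 = [] := (zeroIdx_nil_iff ch).mpr hall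
      rw [hnil]
      simp only [hall, if_true, List.length_nil, List.range_zero, List.foldl_nil]
      exact ⟨hst1.symm, hInv1⟩
    · simp only [hall, Bool.false_eq_true, if_false]
      rw [← hst1]
      rw [foldl_guard (fun i => ch.getD i 1 == 0)
        (fun pr i => dfsA F nl (ch.set i 1)
          (pyCat number ((PySem.List.pyGet? nl (i : Int)).getD 0)) pr)]
      rw [filter_range_eq_zeroIdx, List.range_eq_range']
      have hI := inner_eq F fb' nl ch number ih hF hfb (zeroIdxAux ch 0) [] (by simp)
        st.1 st.2 hInv1
        ((List.range' 0 (zeroIdxAux ch 0).length).foldl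
          (fun acc k => walkB fb' nl
            (pyCat number ((PySem.List.pyGet? nl (((zeroIdxAux ch 0).getD k 0 : Nat) : Int)).getD 0))
            ((zeroIdxAux ch 0).take k ++ (zeroIdxAux ch 0).drop (k + 1)) acc.2 acc.1) st)
        (by simp only [List.length_nil, Prod.mk.eta])
      exact ⟨hI.1.symm, hI.2⟩

-- ===== VERDICT (by name: the statement is the Claim_ definition above) =====
theorem DFS_spec : Claim_equal_DFS := by
  intro nl ch number primes _ _
  unfold Spec_DFS DFS DFS_alt
  simp only [zipIdx_filter_map ch 0, zeroIdxAux_length ch 0]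
  exact (main_eq (ch.count 0 + 1) nl ch number primes (PySem.Set.ofList primes)
    (fun x => PySem.Set.mem_ofList primes x) (by omega) (ch.count 0 + 1) (by omega)).1
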